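-- pv_equiv track=rewrite | github.com/val3riot/ComputerScience | AdventOfCode/2024/9/9.py | find_repeated_number_opt
-- ===== SOURCE A (Python) =====
-- def find_repeated_number_opt(lst, num, value, sequence_length, start, end):
--     for i in range(len(lst[0:start+1]) - sequence_length + 1):
--         sublist = lst[i:i + sequence_length]
--         if sublist == [num] * sequence_length:
--             for j in range(i,i + sequence_length):
--                 lst[j] = value
--             lst = clear_old_value(lst,start,end)
--             break
--     return lst
--
-- def clear_old_value(outl,j,i):
--     for ii in range(j+1,i+1):
--         outl[ii] = None
--     return outl
-- ===== SOURCE B (Python) =====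
-- def find_repeated_number_opt(lst, num, value, sequence_length, start, end):
--     # Single left-to-right pass counting the current run of consecutive num,
--     # instead of slicing and comparing a window at every offset.
--     run = 0
--     hit = None
--     for p, x in enumerate(lst[:start + 1]):
--         if x == num:
--             run += 1
--             if run == sequence_length:
--                 hit = p - sequence_length + 1
--                 break
--         else:
--             run = 0
--     if hit is not None:
--         for j in range(hit, hit + sequence_length):
--             lst[j] = value
--         for ii in range(start + 1, end + 1):
--             lst[ii] = None
--     return lst
-- ===== Notes on version B (the rewrite author's own statement) =====
-- stated objective: alternative
-- what changed: Replaces A's scan that builds and compares a fresh sequence_length-element slice against [num]*sequence_length at every offset by a single left-to-right pass over the searched prefix that counts the current run of consecutive num; the fill/clear writes are unchanged (both mutate lst in place).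
-- intended difference: On nonpositive sequence_length whose clear range start+1..end contains a non-None entry, A returns lst with lst[start+1:end+1] blanked to None, because the empty slice lst[0:0] equals the empty list [num]*sequence_length and so 'matches' at index 0; B finds no run and returns lst unchanged, the intended value since no run of length sequence_length exists. — e.g. on find_repeated_number_opt([some 5], 1, 9, 0, -1, 0): A returns [none], B returns [some 5]
import Mathlib
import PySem

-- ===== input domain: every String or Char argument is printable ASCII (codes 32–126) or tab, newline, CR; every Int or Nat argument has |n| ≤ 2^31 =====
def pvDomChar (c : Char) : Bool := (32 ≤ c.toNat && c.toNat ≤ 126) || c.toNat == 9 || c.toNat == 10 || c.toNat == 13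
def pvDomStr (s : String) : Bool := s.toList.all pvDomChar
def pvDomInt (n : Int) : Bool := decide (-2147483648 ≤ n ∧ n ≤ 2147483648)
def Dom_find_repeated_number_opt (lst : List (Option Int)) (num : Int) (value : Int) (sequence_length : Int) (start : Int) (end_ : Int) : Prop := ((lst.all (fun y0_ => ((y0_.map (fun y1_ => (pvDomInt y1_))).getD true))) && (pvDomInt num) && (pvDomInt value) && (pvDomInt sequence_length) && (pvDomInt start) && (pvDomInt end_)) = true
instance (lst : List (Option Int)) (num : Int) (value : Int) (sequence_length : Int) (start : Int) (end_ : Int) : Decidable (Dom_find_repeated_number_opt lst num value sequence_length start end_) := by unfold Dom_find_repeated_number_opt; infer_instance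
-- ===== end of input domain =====

-- B replaces A's slice-per-offset search by one pass counting the current run of num;
-- both Pythons mutate lst in place; the equivalence proved here is about the return value.

-- ===== PORT A =====
-- shared write primitive: 'for k in range(a, b): xs[k] = v' (Python index assignment, negative wrap);
-- the recursion stops at the first failing write, exactly where Python raises IndexError (such inputs
-- are outside Pre_)
def pvWriteGo (v : Option Int) : Nat → List (Option Int) → Int → List (Option Int)
  | 0, xs, _ => xs
  | n + 1, xs, a =>
    match PySem.List.pySet? xs a v with
    | none => xs
    | some xs' => pvWriteGo v n xs' (a + 1)

def pvWriteRange (xs : List (Option Int)) (a b : Int) (v : Option Int) : List (Option Int) :=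
  pvWriteGo v (b - a).toNat xs a

-- A's 'for i in range(...)' loop with its break: fuel counts the remaining iterations, i is the
-- current index (the recursion stops at the break, as Python's loop does)
def pvALoop (cur : List (Option Int)) (num value sequence_length start end_ : Int) : Nat → Int → List (Option Int)
  | 0, _ => cur
  | n + 1, i =>
    if PySem.List.slice cur (some i) (some (i + sequence_length)) = List.replicate sequence_length.toNat (some num) then
      pvWriteRange (pvWriteRange cur i (i + sequence_length) (some value)) (start + 1) (end_ + 1) none
    else pvALoop cur num value sequence_length start end_ n (i + 1)

def find_repeated_number_opt (lst : List (Option Int)) (num : Int) (value : Int) (sequence_length : Int) (start : Int) (end_ : Int) : List (Option Int) :=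
  pvALoop lst num value sequence_length start end_
    (((PySem.List.slice lst (some 0) (some (start + 1))).length : Int) - sequence_length + 1).toNat 0

-- ===== PORT B =====
-- B's loop 'for p, x in enumerate(lst[:start+1])' with its run counter and break
def pvBScan (num sequence_length : Int) : List (Option Int) → Int → Int → Option Int
  | [], _, _ => none
  | x :: rest, p, run =>
    if x = some num then
      if run + 1 = sequence_length then some (p - sequence_length + 1)
      else pvBScan num sequence_length rest (p + 1) (run + 1)
    else pvBScan num sequence_length rest (p + 1) 0

def find_repeated_number_opt_alt (lst : List (Option Int)) (num : Int) (value : Int) (sequence_length : Int) (start : Int) (end_ : Int) : List (Option Int) :=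
  match pvBScan num sequence_length (PySem.List.slice lst none (some (start + 1))) 0 0 with
  | none => lst
  | some h => pvWriteRange (pvWriteRange lst h (h + sequence_length) (some value)) (start + 1) (end_ + 1) none

-- ===== PRECONDITION & SPEC =====
-- Pre_ excludes exactly the inputs on which A raises IndexError: a qualifying run of num exists in the
-- searched prefix (or sequence_length ≤ 0, when A's empty window always matches), so the clearing pass
-- runs, and range(start+1, end+1) contains an index outside [-len, len).
def Pre_find_repeated_number_opt (lst : List (Option Int)) (num : Int) (value : Int) (sequence_length : Int) (start : Int) (end_ : Int) : Prop :=
  (sequence_length ≤ 0 ∨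
    ∃ i ∈ List.range (PySem.List.slice lst (some 0) (some (start + 1))).length,
      (i : Int) + sequence_length ≤ ((PySem.List.slice lst (some 0) (some (start + 1))).length : Int) ∧
      ∀ x ∈ (lst.drop i).take sequence_length.toNat, x = some num) →
  (start + 1 ≤ end_ → -(lst.length : Int) ≤ start + 1 ∧ end_ < (lst.length : Int))
instance (lst : List (Option Int)) (num : Int) (value : Int) (sequence_length : Int) (start : Int) (end_ : Int) : Decidable (Pre_find_repeated_number_opt lst num value sequence_length start end_) := by unfold Pre_find_repeated_number_opt; infer_instance

def pvWitness_find_repeated_number_opt : List (Option Int) × Int × Int × Int × Int × Int :=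
  ([some 1, some 1], 1, 9, 2, 1, 1)

-- On nonpositive sequence_length whose clear range start+1..end contains a non-None entry, A returns
-- lst with lst[start+1:end+1] blanked to None, because the empty slice lst[0:0] equals the empty list
-- [num]*sequence_length and so 'matches' at index 0; B finds no run and returns lst unchanged, the
-- intended value since no run of length sequence_length exists.
def D_find_repeated_number_opt (lst : List (Option Int)) (num : Int) (value : Int) (sequence_length : Int) (start : Int) (end_ : Int) : Prop :=
  sequence_length ≤ 0 ∧ start + 1 ≤ end_ ∧
  (start + 1 < -(lst.length : Int) ∨ (lst.length : Int) ≤ end_ ∨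
    ∃ ii ∈ PySem.List.pyRange (max (start + 1) (-(lst.length : Int))) (min (end_ + 1) (lst.length : Int)) 1,
      PySem.List.pyGet? lst ii ≠ some none)
instance (lst : List (Option Int)) (num : Int) (value : Int) (sequence_length : Int) (start : Int) (end_ : Int) : Decidable (D_find_repeated_number_opt lst num value sequence_length start end_) := by unfold D_find_repeated_number_opt; infer_instance

def Spec_find_repeated_number_opt (lst : List (Option Int)) (num : Int) (value : Int) (sequence_length : Int) (start : Int) (end_ : Int) (out : List (Option Int)) : Prop := ¬ D_find_repeated_number_opt lst num value sequence_length start end_ → out = find_repeated_number_opt_alt lst num value sequence_length start end_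
instance (lst : List (Option Int)) (num : Int) (value : Int) (sequence_length : Int) (start : Int) (end_ : Int) (out : List (Option Int)) : Decidable (Spec_find_repeated_number_opt lst num value sequence_length start end_ out) := by unfold Spec_find_repeated_number_opt; infer_instance

def pvDiffWitness_find_repeated_number_opt : List (Option Int) × Int × Int × Int × Int × Int :=
  ([some 5], 1, 9, 0, -1, 0)
def pvDiffWitnessOut_find_repeated_number_opt : (List (Option Int)) × (List (Option Int)) :=
  ([none], [some 5])

-- ===== CLAIM (what is proved, stated in full; the proofs are below) =====
def Claim_unchanged_find_repeated_number_opt : Prop := ∀ (lst : List (Option Int)) (num : Int) (value : Int) (sequence_length : Int) (start : Int) (end_ : Int), Dom_find_repeated_number_opt lst num value sequence_length start end_ → Pre_find_repeated_number_opt lst num value sequence_length start end_ → Spec_find_repeated_number_opt lst num value sequence_length start end_ (find_repeated_number_opt lst num value sequence_length start end_)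
def Claim_changed_find_repeated_number_opt : Prop := Dom_find_repeated_number_opt (pvDiffWitness_find_repeated_number_opt.1) (pvDiffWitness_find_repeated_number_opt.2.1) (pvDiffWitness_find_repeated_number_opt.2.2.1) (pvDiffWitness_find_repeated_number_opt.2.2.2.1) (pvDiffWitness_find_repeated_number_opt.2.2.2.2.1) (pvDiffWitness_find_repeated_number_opt.2.2.2.2.2) ∧ Pre_find_repeated_number_opt (pvDiffWitness_find_repeated_number_opt.1) (pvDiffWitness_find_repeated_number_opt.2.1) (pvDiffWitness_find_repeated_number_opt.2.2.1) (pvDiffWitness_find_repeated_number_opt.2.2.2.1) (pvDiffWitness_find_repeated_number_opt.2.2.2.2.1) (pvDiffWitness_find_repeated_number_opt.2.2.2.2.2) ∧ D_find_repeated_number_opt (pvDiffWitness_find_repeated_number_opt.1) (pvDiffWitness_find_repeated_number_opt.2.1) (pvDiffWitness_find_repeated_number_opt.2.2.1) (pvDiffWitness_find_repeated_number_opt.2.2.2.1) (pvDiffWitness_find_repeated_number_opt.2.2.2.2.1) (pvDiffWitness_find_repeated_number_opt.2.2.2.2.2) ∧ find_repeated_number_opt (pvDiffWitness_find_repeated_number_opt.1)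 (pvDiffWitness_find_repeated_number_opt.2.1) (pvDiffWitness_find_repeated_number_opt.2.2.1) (pvDiffWitness_find_repeated_number_opt.2.2.2.1) (pvDiffWitness_find_repeated_number_opt.2.2.2.2.1) (pvDiffWitness_find_repeated_number_opt.2.2.2.2.2) = pvDiffWitnessOut_find_repeated_number_opt.1 ∧ find_repeated_number_opt_alt (pvDiffWitness_find_repeated_number_opt.1) (pvDiffWitness_find_repeated_number_opt.2.1) (pvDiffWitness_find_repeated_number_opt.2.2.1) (pvDiffWitness_find_repeated_number_opt.2.2.2.1) (pvDiffWitness_find_repeated_number_opt.2.2.2.2.1) (pvDiffWitness_find_repeated_number_opt.2.2.2.2.2) = pvDiffWitnessOut_find_repeated_number_opt.2 ∧ pvDiffWitnessOut_find_repeated_number_opt.1 ≠ pvDiffWitnessOut_find_repeated_number_opt.2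
def Claim_exact_find_repeated_number_opt : Prop := ∀ (lst : List (Option Int)) (num : Int) (value : Int) (sequence_length : Int) (start : Int) (end_ : Int), Dom_find_repeated_number_opt lst num value sequence_length start end_ → Pre_find_repeated_number_opt lst num value sequence_length start end_ → D_find_repeated_number_opt lst num value sequence_length start end_ → find_repeated_number_opt lst num value sequence_length start end_ ≠ find_repeated_number_opt_alt lst num value sequence_length start end_

-- ===== LEMMAS AND PROOFS =====

-- first-match search on a list: first index i with (ys.drop i).take L = replicate L t
def pvSearch (t : Option Int) (L : Nat) : List (Option Int) → Option Nat
  | [] => none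
  | x :: rest =>
    if (x :: rest).take L = List.replicate L t then some 0
    else (pvSearch t L rest).map (· + 1)

theorem pvSearch_none_of_short (t : Option Int) (L : Nat) (ys : List (Option Int))
    (h : ys.length < L) : pvSearch t L ys = none := by
  induction ys with
  | nil => rfl
  | cons x rest ih =>
    rw [pvSearch]
    rw [if_neg, ih (by simp at h ⊢; omega), Option.map_none]
    intro hc
    have := congrArg List.length hc
    simp at this h
    omega

theorem pvFind?_congr {α : Type} (l : List α) (p q : α → Bool)
    (h : ∀ a ∈ l, p a = q a) : l.find? p = l.find? q := by
  induction l with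
  | nil => rfl
  | cons a l ih =>
    simp only [List.find?]
    rw [h a (by simp)]
    cases q a
    · exact ih (fun b hb => h b (by simp [hb]))
    · rfl

theorem pvALoop_eq_find? (cur : List (Option Int)) (num value L start end_ : Int) :
    ∀ (n : Nat) (i0 : Int),
    pvALoop cur num value L start end_ n i0 =
      match ((List.range n).map (fun k : Nat => i0 + (k : Int))).find? (fun i => decide (PySem.List.slice cur (some i) (some (i + L)) = List.replicate L.toNat (some num))) with
      | none => cur
      | some i => pvWriteRange (pvWriteRange cur i (i + L) (some value)) (start + 1) (end_ + 1) none := by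
  intro n
  induction n with
  | zero => intro i0; rfl
  | succ n ih =>
    intro i0
    have hmap : (List.range (n + 1)).map (fun k : Nat => i0 + (k : Int))
        = i0 :: (List.range n).map (fun k : Nat => (i0 + 1) + (k : Int)) := by
      rw [List.range_succ_eq_map, List.map_cons, List.map_map]
      refine congrArg₂ _ (by simp) (List.map_congr_left ?_)
      intro k _
      simp only [Function.comp_apply]
      push_cast
      ring
    rw [pvALoop, hmap, List.find?]
    by_cases h : PySem.List.slice cur (some i0) (some (i0 + L)) = List.replicate L.toNat (some num)
    · rw [if_pos h]
      simp [h]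
    · rw [if_neg h]
      simp only [h, decide_false]
      exact ih (i0 + 1)

-- find? over range(len+1-L) equals pvSearch
theorem pvRangeFind_eq_search (t : Option Int) (L : Nat) (hL : 1 ≤ L) (ys : List (Option Int)) :
    (List.range (ys.length + 1 - L)).find?
      (fun i => decide ((ys.drop i).take L = List.replicate L t)) = pvSearch t L ys := by
  induction ys with
  | nil =>
    have : (0 : Nat) + 1 - L = 0 := by omega
    rw [List.length_nil, this]
    rfl
  | cons x rest ih =>
    by_cases hlen : L ≤ (x :: rest).length
    · have hcount : (x :: rest).length + 1 - L = (rest.length + 1 - L) + 1 := by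
        simp at hlen ⊢; omega
      rw [hcount, List.range_succ_eq_map, List.find?]
      rw [pvSearch]
      by_cases h0 : (x :: rest).take L = List.replicate L t
      · simp [h0]
      · have hp0 : (decide (((x :: rest).drop 0).take L = List.replicate L t)) = false := by
          simp [h0]
        rw [hp0, if_neg h0, List.find?_map, ← ih]
        rfl
    · push_neg at hlen
      have hc : (x :: rest).length + 1 - L = 0 := by omega
      rw [hc]
      have h0 : ¬ (x :: rest).take L = List.replicate L t := by
        intro hc'
        have := congrArg List.length hc'
        simp only [List.length_take, List.length_replicate, List.length_cons] at this
        simp only [List.length_cons] at hlen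
        omega
      rw [pvSearch, if_neg h0,
        pvSearch_none_of_short t L rest (by simp only [List.length_cons] at hlen; omega)]
      rfl

-- a run of r < L copies of t followed by a non-t element shifts the first match past it
theorem pvSearch_replicate_cons (t x : Option Int) (L : Nat) (hL : 1 ≤ L)
    (hx : x ≠ t) (xs : List (Option Int)) :
    ∀ r, r < L →
      pvSearch t L (List.replicate r t ++ x :: xs) = (pvSearch t L xs).map (· + (r + 1)) := by
  intro r
  induction r with
  | zero =>
    intro _
    have h0 : ¬ (x :: xs).take L = List.replicate L t := by
      intro hc
      have h1 : ((x :: xs).take L)[0]? = (List.replicate L t)[0]? := by rw [hc]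
      rw [List.getElem?_take_of_lt (by omega), List.getElem?_replicate_of_lt (by omega)] at h1
      simp at h1
      exact hx h1
    rw [List.replicate_zero, List.nil_append, pvSearch, if_neg h0]
  | succ r ih =>
    intro hr
    have hne : ¬ (t :: (List.replicate r t ++ x :: xs)).take L = List.replicate L t := by
      intro hc
      have h1 : ((t :: (List.replicate r t ++ x :: xs)).take L)[r + 1]? = (List.replicate L t)[r + 1]? := by
        rw [hc]
      rw [List.getElem?_take_of_lt (by omega), List.getElem?_replicate_of_lt (by omega)] at h1
      have h2 : (t :: (List.replicate r t ++ x :: xs))[r + 1]? = some x := by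
        simp [List.getElem?_append_right]
      rw [h2] at h1
      exact hx (by simpa using h1)
    rw [List.replicate_succ, List.cons_append, pvSearch, if_neg hne, ih (by omega)]
    cases pvSearch t L xs <;> simp <;> omega

-- the scan invariant: run counts the trailing copies of t already consumed
theorem pvBScan_eq_search (num L : Int) (hL : 1 ≤ L) :
    ∀ (xs : List (Option Int)) (r : Nat) (p : Int),
      (r : Int) + 1 ≤ L →
      pvBScan num L xs p (r : Int) =
        (pvSearch (some num) L.toNat (List.replicate r (some num) ++ xs)).map
          (fun i => p - (r : Int) + (i : Int)) := by
  intro xs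
  induction xs with
  | nil =>
    intro r p hr
    rw [pvBScan, pvSearch_none_of_short _ _ _ (by simp; omega)]
    rfl
  | cons x rest ih =>
    intro r p hr
    by_cases hx : x = some num
    · subst hx
      by_cases hfin : (r : Int) + 1 = L
      · rw [pvBScan]
        simp only [if_pos rfl, if_pos hfin]
        have htake : (List.replicate r (some num) ++ some num :: rest).take L.toNat
            = List.replicate L.toNat (some num) := by
          have hrep : List.replicate r (some num) ++ some num :: rest
              = List.replicate (r + 1) (some num) ++ rest := by
            rw [List.replicate_succ', List.append_assoc]; rfl
          have hLr : L.toNat = r + 1 := by omega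
          rw [hrep, hLr, List.take_append_of_le_length (by simp), List.take_replicate]
          simp
        have hlen1 : 0 < (List.replicate r (some num) ++ some num :: rest).length := by simp
        cases hrep : List.replicate r (some num) ++ some num :: rest with
        | nil => simp [hrep] at hlen1
        | cons y ys =>
          rw [pvSearch, ← hrep, if_pos htake]
          simp
          omega
      · rw [pvBScan]
        simp only [if_pos rfl, if_neg hfin]
        have hcast : (r : Int) + 1 = ((r + 1 : Nat) : Int) := by push_cast; ring
        rw [hcast, ih (r + 1) (p + 1) (by push_cast; omega)]
        have hrep : List.replicate (r + 1) (some num) ++ rest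
            = List.replicate r (some num) ++ some num :: rest := by
          rw [List.replicate_succ', List.append_assoc]; rfl
        rw [hrep]
        cases pvSearch (some num) L.toNat (List.replicate r (some num) ++ some num :: rest) <;>
          simp <;> push_cast <;> ring
    · rw [pvBScan, if_neg hx]
      have h0 : ((0 : Nat) : Int) = (0 : Int) := rfl
      rw [← h0, ih 0 (p + 1) (by omega)]
      rw [List.replicate_zero, List.nil_append,
        pvSearch_replicate_cons (some num) x L.toNat (by omega) hx rest r (by omega)]
      cases pvSearch (some num) L.toNat rest <;> simp <;> push_cast <;> ring

-- for sequence_length ≥ 1 the scan never hits with run + 1 > L, so for L ≤ 0 it returns none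
theorem pvBScan_none_of_nonpos (num L : Int) (hL : L ≤ 0) :
    ∀ (xs : List (Option Int)) (p run : Int), 0 ≤ run → pvBScan num L xs p run = none := by
  intro xs
  induction xs with
  | nil => intro p run _; rfl
  | cons x rest ih =>
    intro p run hrun
    rw [pvBScan]
    by_cases hx : x = some num
    · rw [if_pos hx, if_neg (by omega)]
      exact ih (p + 1) (run + 1) (by omega)
    · rw [if_neg hx]
      exact ih (p + 1) 0 le_rfl

-- slice lst[i:i+L] against the searched prefix, for i + L within the prefix
theorem pvSliceBridge (lst : List (Option Int)) (L : Int) (hL : 1 ≤ L) (n0 k : Nat)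
    (hn0 : n0 ≤ lst.length) (hk : k + L.toNat ≤ n0) :
    PySem.List.slice lst (some (k : Int)) (some ((k : Int) + L)) =
      ((lst.take n0).drop k).take L.toNat := by
  have h1 : PySem.List.slice lst (some (k : Int)) (some ((k : Int) + L)) =
      (lst.drop k).take L.toNat := by
    rw [show (k : Int) + L = (k : Int) + ((L.toNat : Nat) : Int) by omega,
      PySem.List.slice_natCast_add]
  rw [h1, List.drop_take]
  rw [List.take_take]
  congr 1
  omega

-- the searched prefix is a prefix of lst, hence a take of lst
theorem pvPrefix_slice (lst : List (Option Int)) (b : Int) :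
    PySem.List.slice lst none (some b) <+: lst := by
  by_cases hb : 0 ≤ b
  · rw [PySem.List.slice_to lst hb]
    exact List.take_prefix _ _
  · push_neg at hb
    have hk : b = -(((-b).toNat : Nat) : Int) := by omega
    rw [hk, PySem.List.slice_to_neg_natCast lst (k := (-b).toNat) (by omega)]
    exact List.take_prefix _ _

-- for sequence_length ≤ 0 the fill loop is empty, so once some traversed window matches,
-- A clears and returns (A's cur never changes before the break)
theorem pvALoop_clear_of_mem (lst : List (Option Int)) (num value L start end_ : Int)
    (hL : L ≤ 0) :
    ∀ (n : Nat) (i0 : Int),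
    (∃ k ∈ List.range n, PySem.List.slice lst (some (i0 + (k : Int))) (some (i0 + (k : Int) + L)) = List.replicate L.toNat (some num)) →
    pvALoop lst num value L start end_ n i0 = pvWriteRange lst (start + 1) (end_ + 1) none := by
  intro n
  induction n with
  | zero => intro i0 hex; simp at hex
  | succ n ih =>
    intro i0 hex
    rw [pvALoop]
    by_cases h : PySem.List.slice lst (some i0) (some (i0 + L)) = List.replicate L.toNat (some num)
    · rw [if_pos h]
      have hfill : pvWriteRange lst i0 (i0 + L) (some value) = lst := by
        rw [pvWriteRange, show (i0 + L - i0).toNat = 0 by omega]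
        rfl
      rw [hfill]
    · rw [if_neg h]
      apply ih
      rcases hex with ⟨k, hk, hcheck⟩
      rw [List.mem_range] at hk
      rcases Nat.eq_zero_or_pos k with rfl | hkpos
      · exact absurd (by simpa using hcheck) h
      · refine ⟨k - 1, List.mem_range.mpr (by omega), ?_⟩
        have : (i0 + 1) + ((k - 1 : Nat) : Int) = i0 + (k : Int) := by
          push_cast [Nat.cast_sub hkpos]
          ring
        rw [this]
        exact hcheck

-- for sequence_length ≤ 0 the empty window at index -L always qualifies
theorem pvEmptyMatch (lst : List (Option Int)) (L start : Int) (hL : L ≤ 0) :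
    ∃ k ∈ List.range (((PySem.List.slice lst (some 0) (some (start + 1))).length : Int) - L + 1).toNat,
      PySem.List.slice lst (some ((0 : Int) + (k : Int))) (some ((0 : Int) + (k : Int) + L)) = List.replicate L.toNat (some num') := by
  refine ⟨(-L).toNat, ?_, ?_⟩
  · rw [List.mem_range]
    have h0 : (0 : Int) ≤ ((PySem.List.slice lst (some 0) (some (start + 1))).length : Int) := by
      positivity
    omega
  · rw [show (0 : Int) + ((-L).toNat : Int) + L = (0 : Int) by omega,
      PySem.List.slice_toNat lst (a := (0 : Int) + ((-L).toNat : Int)) (b := 0) (by omega) le_rfl]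
    simp [Int.toNat_eq_zero.mpr hL]

-- a resolved Python index is a valid position
theorem pvIdx_lt (n : Nat) (i : Int) (k : Nat) (h : PySem.List.pyIdx? n i = some k) : k < n := by
  simp only [PySem.List.pyIdx?] at h
  split_ifs at h <;> simp at h <;> omega

-- writing None at a position already holding None is the identity write
theorem pvSet?_self (xs : List (Option Int)) (i : Int)
    (h : PySem.List.pyGet? xs i = some none) : PySem.List.pySet? xs i none = some xs := by
  simp only [PySem.List.pyGet?, PySem.List.pySet?] at *
  cases hk : PySem.List.pyIdx? xs.length i with
  | none => rw [hk] at h; simp at h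
  | some k =>
    rw [hk] at h
    simp only [Option.bind_some] at h
    simp only [hk, Option.map_some, Option.some.injEq]
    apply List.ext_getElem?
    intro m
    rw [List.getElem?_set]
    by_cases hm : k = m
    · rw [if_pos hm, if_pos (pvIdx_lt xs.length i k hk), ← hm, h]
    · rw [if_neg hm]

-- clearing a range of positions that are all already None is the identity
theorem pvWriteGo_id (n : Nat) : ∀ (xs : List (Option Int)) (a : Int),
    (∀ i, a ≤ i → i < a + (n : Int) → PySem.List.pyGet? xs i = some none) →
    pvWriteGo none n xs a = xs := by
  induction n with
  | zero => intro xs a _; rfl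
  | succ n ih =>
    intro xs a h
    rw [pvWriteGo, pvSet?_self xs a (h a le_rfl (by push_cast; omega))]
    exact ih xs (a + 1) (fun i hi1 hi2 => h i (by omega) (by push_cast at hi2 ⊢; omega))

-- writes of None preserve a None reading
theorem pvGet_none_stable (xs : List (Option Int)) (j ii : Int) (xs' : List (Option Int))
    (hset : PySem.List.pySet? xs j none = some xs')
    (h : PySem.List.pyGet? xs ii = some none) :
    PySem.List.pyGet? xs' ii = some none := by
  simp only [PySem.List.pyGet?, PySem.List.pySet?] at *
  cases hj : PySem.List.pyIdx? xs.length j with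
  | none => rw [hj] at hset; simp at hset
  | some kj =>
    rw [hj] at hset
    simp only [Option.map_some, Option.some.injEq] at hset
    subst hset
    simp only [List.length_set]
    cases hii : PySem.List.pyIdx? xs.length ii with
    | none => rw [hii] at h; simp at h
    | some kii =>
      rw [hii] at h
      simp only [Option.bind_some] at h ⊢
      rw [List.getElem?_set]
      by_cases hm : kj = kii
      · rw [if_pos hm, if_pos (pvIdx_lt xs.length j kj hj)]
      · rw [if_neg hm]
        exact h

-- None stability through the whole write loop
theorem pvWrite_none_stable (n : Nat) : ∀ (xs : List (Option Int)) (a ii : Int),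
    PySem.List.pyGet? xs ii = some none →
    PySem.List.pyGet? (pvWriteGo none n xs a) ii = some none := by
  induction n with
  | zero => intro xs a ii h; exact h
  | succ n ih =>
    intro xs a ii h
    rw [pvWriteGo]
    cases hset : PySem.List.pySet? xs a none with
    | none => exact h
    | some xs' => exact ih xs' (a + 1) ii (pvGet_none_stable xs a ii xs' hset h)

-- lengths are preserved by a successful write
theorem pvSet?_length (xs xs' : List (Option Int)) (j : Int)
    (hset : PySem.List.pySet? xs j none = some xs') : xs'.length = xs.length := by
  simp only [PySem.List.pySet?] at hset
  cases hj : PySem.List.pyIdx? xs.length j with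
  | none => rw [hj] at hset; simp at hset
  | some kj =>
    rw [hj] at hset
    simp only [Option.map_some, Option.some.injEq] at hset
    rw [← hset, List.length_set]

-- the write at ii itself makes the position read None
theorem pvGet_after_set (xs xs' : List (Option Int)) (ii : Int)
    (hset : PySem.List.pySet? xs ii none = some xs') :
    PySem.List.pyGet? xs' ii = some none := by
  simp only [PySem.List.pyGet?, PySem.List.pySet?] at *
  cases hk : PySem.List.pyIdx? xs.length ii with
  | none => rw [hk] at hset; simp at hset
  | some k =>
    rw [hk] at hset
    simp only [Option.map_some, Option.some.injEq] at hset
    subst hset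
    simp only [List.length_set, hk, Option.bind_some]
    rw [List.getElem?_set, if_pos rfl, if_pos (pvIdx_lt xs.length ii k hk)]

-- every position of the cleared range reads None afterwards (all range positions valid)
theorem pvGet_after_fold (n : Nat) : ∀ (xs : List (Option Int)) (a ii : Int),
    (∀ i, a ≤ i → i < a + (n : Int) → (PySem.List.pyIdx? xs.length i).isSome) →
    a ≤ ii → ii < a + (n : Int) →
    PySem.List.pyGet? (pvWriteGo none n xs a) ii = some none := by
  induction n with
  | zero => intro xs a ii _ h1 h2; omega
  | succ n ih =>
    intro xs a ii hvalid h1 h2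
    rw [pvWriteGo]
    cases hset : PySem.List.pySet? xs a none with
    | none =>
      exfalso
      have := hvalid a le_rfl (by push_cast; omega)
      simp only [PySem.List.pySet?] at hset
      cases hk : PySem.List.pyIdx? xs.length a with
      | none => rw [hk] at this; simp at this
      | some k => rw [hk] at hset; simp at hset
    | some xs' =>
      have hlen := pvSet?_length xs xs' a hset
      by_cases hii : ii = a
      · subst hii
        exact pvWrite_none_stable n xs' (ii + 1) ii (pvGet_after_set xs xs' ii hset)
      · exact ih xs' (a + 1) ii
          (fun i hi1 hi2 => by rw [hlen]; exact hvalid i (by omega) (by push_cast at hi2 ⊢; omega))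
          (by omega) (by push_cast at h2 ⊢; omega)

-- ===== main agreement proof (outside D_) =====
theorem find_repeated_number_opt_main (lst : List (Option Int)) (num value sequence_length start end_ : Int)
    (hpre : Pre_find_repeated_number_opt lst num value sequence_length start end_)
    (hnd : ¬ D_find_repeated_number_opt lst num value sequence_length start end_) :
    find_repeated_number_opt lst num value sequence_length start end_ =
      find_repeated_number_opt_alt lst num value sequence_length start end_ := by
  by_cases hL : sequence_length ≤ 0
  · -- sequence_length ≤ 0: A matches the empty window and clears; B's run counter never
    -- reaches sequence_length; outside D_ the cleared range is already all None, so both return lst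
    have hA : find_repeated_number_opt lst num value sequence_length start end_
        = pvWriteRange lst (start + 1) (end_ + 1) none := by
      rw [find_repeated_number_opt]
      exact pvALoop_clear_of_mem lst num value sequence_length start end_ hL _ 0
        (pvEmptyMatch lst sequence_length start hL)
    have hB : find_repeated_number_opt_alt lst num value sequence_length start end_ = lst := by
      rw [find_repeated_number_opt_alt,
        pvBScan_none_of_nonpos num sequence_length hL _ 0 0 le_rfl]
    rw [hA, hB, pvWriteRange]
    apply pvWriteGo_id
    intro i hi1 hi2
    have hle : start + 1 ≤ end_ := by omega
    by_contra hne
    apply hnd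
    refine ⟨hL, hle, ?_⟩
    by_cases hlo : start + 1 < -(lst.length : Int)
    · exact Or.inl hlo
    by_cases hhi : (lst.length : Int) ≤ end_
    · exact Or.inr (Or.inl hhi)
    refine Or.inr (Or.inr ⟨i, ?_, hne⟩)
    rw [PySem.List.mem_pyRange_one]
    omega
  · -- 1 ≤ sequence_length: both sides compute the first qualifying run via pvSearch
    have hL1 : (1 : Int) ≤ sequence_length := by omega
    set P := PySem.List.slice lst none (some (start + 1)) with hPdef
    set n0 := P.length with hn0def
    have hPfx : P <+: lst := pvPrefix_slice lst (start + 1)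
    have hn0 : n0 ≤ lst.length := hPfx.length_le
    have hP : P = lst.take n0 := List.prefix_iff_eq_take.mp hPfx
    have hsl0 : PySem.List.slice lst (some 0) (some (start + 1)) = P := by
      rw [PySem.List.slice_zero_start]
    have hA : find_repeated_number_opt lst num value sequence_length start end_ =
        match (pvSearch (some num) sequence_length.toNat P).map (fun k : Nat => (0 : Int) + k) with
        | none => lst
        | some i => pvWriteRange (pvWriteRange lst i (i + sequence_length) (some value))
            (start + 1) (end_ + 1) none := by
      rw [find_repeated_number_opt, pvALoop_eq_find?, List.find?_map, hsl0]
      have hcong : ((List.range (((n0 : Int) - sequence_length + 1)).toNat).find?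
            ((fun i => decide (PySem.List.slice lst (some i) (some (i + sequence_length))
                = List.replicate sequence_length.toNat (some num))) ∘ (fun k : Nat => (0 : Int) + k)))
          = (List.range (P.length + 1 - sequence_length.toNat)).find?
            (fun k => decide ((P.drop k).take sequence_length.toNat
                = List.replicate sequence_length.toNat (some num))) := by
        rw [show (((n0 : Int) - sequence_length + 1)).toNat = P.length + 1 - sequence_length.toNat by
          rw [← hn0def]; omega]
        apply pvFind?_congr
        intro k hk
        rw [List.mem_range] at hk
        have hk' : k + sequence_length.toNat ≤ n0 := by rw [← hn0def] at hk; omega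
        simp only [Function.comp_apply, zero_add,
          pvSliceBridge lst sequence_length hL1 n0 k hn0 hk', hP]
      rw [hcong, pvRangeFind_eq_search (some num) sequence_length.toNat (by omega) P]
    have h := pvBScan_eq_search num sequence_length hL1 P 0 0 (by omega)
    simp only [Nat.cast_zero, List.replicate_zero, List.nil_append] at h
    rw [hA, find_repeated_number_opt_alt, ← hPdef, h]
    cases pvSearch (some num) sequence_length.toNat P with
    | none => rfl
    | some i => simp

-- ===== VERDICT (by name: the statements are the Claim_ definitions above) =====
theorem find_repeated_number_opt_spec : Claim_unchanged_find_repeated_number_opt := by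
  intro lst num value sequence_length start end_ _ hpre
  unfold Spec_find_repeated_number_opt
  intro hnd
  exact find_repeated_number_opt_main lst num value sequence_length start end_ hpre hnd

theorem find_repeated_number_opt_changed : Claim_changed_find_repeated_number_opt := by
  unfold Claim_changed_find_repeated_number_opt; decide

theorem find_repeated_number_opt_tight : Claim_exact_find_repeated_number_opt := by
  intro lst num value sequence_length start end_ _ hpre hd
  rcases hd with ⟨hL, hle, hd3⟩
  have hbounds : -(lst.length : Int) ≤ start + 1 ∧ end_ < (lst.length : Int) :=
    hpre (Or.inl hL) hle
  rcases hd3 with hlo | hhi | ⟨ii, hmem, hne⟩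
  · omega
  · omega
  have hrange := (PySem.List.mem_pyRange_one).mp hmem
  have hrange' : start + 1 ≤ ii ∧ ii < end_ + 1 := by
    constructor <;> [skip; skip] <;> omega
  have hA : find_repeated_number_opt lst num value sequence_length start end_
      = pvWriteRange lst (start + 1) (end_ + 1) none := by
    rw [find_repeated_number_opt]
    exact pvALoop_clear_of_mem lst num value sequence_length start end_ hL _ 0
      (pvEmptyMatch lst sequence_length start hL)
  have hB : find_repeated_number_opt_alt lst num value sequence_length start end_ = lst := by
    rw [find_repeated_number_opt_alt,
      pvBScan_none_of_nonpos num sequence_length hL _ 0 0 le_rfl]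
  rw [hA, hB]
  intro heq
  have hget : PySem.List.pyGet? (pvWriteRange lst (start + 1) (end_ + 1) none) ii = some none := by
    rw [pvWriteRange]
    apply pvGet_after_fold
    · intro i hi1 hi2
      have hib : i < end_ + 1 := by omega
      simp only [PySem.List.pyIdx?]
      split_ifs with h1 h2 h3
      · simp
      · omega
      · simp
      · omega
    · omega
    · omega
  rw [heq] at hget
  exact hne hget
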